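-- pv_equiv track=rewrite | github.com/brianvanderburg2/python-mrbaviirc-common | mrbaviirc/common/util/__init__.py | strip_unneeded_whitespace
-- ===== SOURCE A (Python) =====
-- def common_start(ina, inb):
--     """ Return the common part at the beginning of two strings. """
--     result = []
--     for (a, b) in zip(ina, inb):
--         if a == b:
--             result.append(a)
--         else:
--             break
--
--     return ''.join(result)
--
-- def strip_unneeded_whitespace(what):
--     """ Strip empy leading and trailing lines, all whitespace from blank lines,
--         common leading whitespace and all tailing whitespace from non-blank lines. """
--     lines = what.splitlines()
--
--     # Remove leading and trailing empty lines
--     while lines and len(lines[0].strip()) == 0: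
--         lines.pop(0)
--
--     while lines and len(lines[-1].strip()) == 0:
--         lines.pop()
--
--     # Need at least two lines for comparison
--     if len(lines) == 0:
--         return ""
--     elif len(lines) == 1:
--         return lines[0].strip()
--
--     # Determine common leading portion of lines
--     common = lines[0]
--     for (i, line) in enumerate(lines[1:], 1):
--
--         if len(line.strip()) == 0:
--             # Ignore blank lines and strip any space on them
--             lines[i] = ""
--         else:
--             # Find match between current common and current line
--             common = common_start(common, line)
--
--     # Remove common starting whitespace
--     start = len(common) - len(common.lstrip())
--     outlines = [line[start:].rstrip() if line else "" for line in lines]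
--
--     return '\n'.join(outlines)
-- ===== SOURCE B (Python) =====
-- def strip_unneeded_whitespace(what):
--     """ Strip empty leading and trailing lines, all whitespace from blank lines,
--         common leading whitespace and all trailing whitespace from non-blank lines. """
--     lines = what.splitlines()
--     nonblank_idx = [i for i, line in enumerate(lines) if line.strip()]
--     if not nonblank_idx:
--         return ""
--     lines = lines[nonblank_idx[0]:nonblank_idx[-1] + 1]
--     if len(lines) == 1:
--         return lines[0].strip()
--     nonblank = [line for line in lines if line.strip()]
--     first = nonblank[0]
--     # column-wise: extend while the column is whitespace and shared by all non-blank lines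
--     start = 0
--     while (start < len(first) and first[start].isspace()
--            and all(len(line) > start and line[start] == first[start]
--                    for line in nonblank[1:])):
--         start += 1
--     return '\n'.join(line[start:].rstrip() if line.strip() else ""
--                      for line in lines)
-- ===== Notes on version B (the rewrite author's own statement) =====
-- stated objective: alternative
-- what changed: B replaces A's pop-from-both-ends loops, pairwise common_start folding over a mutated list and final truthiness pass with a slice between the first and last non-blank line indices, a single column-wise scan that grows the strippable indent while the column is whitespace and shared by all non-blank lines, and one output pass keyed on blankness.
import Mathlib
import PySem

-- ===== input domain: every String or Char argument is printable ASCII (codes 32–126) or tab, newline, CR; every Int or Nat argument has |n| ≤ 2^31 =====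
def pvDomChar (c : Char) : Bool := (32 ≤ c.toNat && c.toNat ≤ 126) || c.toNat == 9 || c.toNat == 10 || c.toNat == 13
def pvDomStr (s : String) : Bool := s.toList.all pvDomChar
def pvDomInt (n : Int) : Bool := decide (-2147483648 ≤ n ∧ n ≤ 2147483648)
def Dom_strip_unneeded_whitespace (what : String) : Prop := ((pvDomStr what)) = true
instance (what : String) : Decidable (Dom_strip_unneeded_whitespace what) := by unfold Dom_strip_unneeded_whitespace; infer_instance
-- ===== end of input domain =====

-- B strips blank borders by locating the first/last non-blank line indices and slicing, and finds the
-- strippable indent with one column-wise scan over the non-blank lines instead of A's pop-loops,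
-- pairwise common-prefix folding and in-place blanking (objective: alternative decomposition, same cost).

-- ===== PORT A =====
-- port of common_start: the for-loop over zip(ina, inb) with its break
def commonStartA : List Char → List Char → List Char
  | a :: as, b :: bs => if a == b then a :: commonStartA as bs else []
  | _, _ => []


def strip_unneeded_whitespace (what : String) : String :=
  let lines := PySem.Chars.splitlines what.toList
  let lines := lines.dropWhile (fun l => (PySem.Chars.strip l).length == 0)
  let lines := (lines.reverse.dropWhile (fun l => (PySem.Chars.strip l).length == 0)).reverse
  match lines with
  | [] => ""
  | [l] => String.ofList (PySem.Chars.strip l)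
  | l0 :: rest =>
    let st := rest.foldl
      (fun (st : List (List Char) × List Char) line =>
        if (PySem.Chars.strip line).length == 0 then (([] : List Char) :: st.1, st.2)
        else (line :: st.1, commonStartA st.2 line))
      ([l0], l0)
    let lines := st.1.reverse
    let common := st.2
    let start := common.length - (PySem.Chars.lstrip common).length
    let outlines := lines.map (fun line =>
      if line.isEmpty then ([] : List Char) else PySem.Chars.rstrip (line.drop start))
    String.ofList (PySem.Chars.join ['\n'] outlines)

-- ===== PORT B =====
-- port of B's while-loop: extend start while the column is whitespace and shared by every other non-blank line
def scanStartB (first : List Char) (rest : List (List Char)) (start : Nat) : Nat :=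
  if h : start < first.length then
    if PySem.Chars.isspace first[start] = true ∧ ∀ l ∈ rest, start < l.length ∧ l[start]? = some first[start] then
      scanStartB first rest (start + 1)
    else start
  else start
termination_by first.length - start


def strip_unneeded_whitespace_alt (what : String) : String :=
  let lines := PySem.Chars.splitlines what.toList
  let idxs := ((PySem.List.enumerate lines).filter (fun p => !(PySem.Chars.strip p.2).isEmpty)).map (·.1)
  if idxs.isEmpty then ""
  else
    -- nonblank_idx[0] / nonblank_idx[-1]: idxs is non-empty on this branch
    let lines := PySem.List.slice lines (some (idxs.headD 0)) (some (idxs.getLastD 0 + 1))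
    if lines.length == 1 then String.ofList (PySem.Chars.strip (lines.headD []))
    else
      let nonblank := lines.filter (fun l => !(PySem.Chars.strip l).isEmpty)
      -- nonblank[0]: nonblank is never empty when this branch runs
      let first := nonblank.headD []
      let start := scanStartB first (nonblank.drop 1) 0
      String.ofList (PySem.Chars.join ['\n']
        (lines.map (fun l =>
          if !(PySem.Chars.strip l).isEmpty then PySem.Chars.rstrip (l.drop start) else [])))

-- ===== PRECONDITION & SPEC =====
def Spec_strip_unneeded_whitespace (what : String) (out : String) : Prop := out = strip_unneeded_whitespace_alt what
instance (what : String) (out : String) : Decidable (Spec_strip_unneeded_whitespace what out) := by unfold Spec_strip_unneeded_whitespace; infer_instance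

-- ===== CLAIM (what is proved, stated in full; the proofs are below) =====
def Claim_equal_strip_unneeded_whitespace : Prop := ∀ (what : String), Dom_strip_unneeded_whitespace what → Spec_strip_unneeded_whitespace what (strip_unneeded_whitespace what)

-- ===== LEMMAS AND PROOFS =====

lemma cs_nil_left (b : List Char) : commonStartA [] b = [] := by cases b <;> rfl
lemma cs_nil_right (a : List Char) : commonStartA a [] = [] := by cases a <;> rfl
lemma cs_cons (x y : Char) (as bs : List Char) :
    commonStartA (x :: as) (y :: bs) = if x == y then x :: commonStartA as bs else [] := rfl

lemma cs_prefix_left : ∀ (a b : List Char), commonStartA a b <+: a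
  | [], _ => by simp [cs_nil_left]
  | _ :: _, [] => by simp [cs_nil_right]
  | x :: as, y :: bs => by
      rw [cs_cons]
      split
      · exact List.cons_prefix_cons.mpr ⟨rfl, cs_prefix_left as bs⟩
      · exact List.nil_prefix

lemma cs_prefix_right : ∀ (a b : List Char), commonStartA a b <+: b
  | [], _ => by simp [cs_nil_left]
  | _ :: _, [] => by simp [cs_nil_right]
  | x :: as, y :: bs => by
      rw [cs_cons]
      split
      · rename_i h
        exact List.cons_prefix_cons.mpr ⟨(by simpa using h), cs_prefix_right as bs⟩
      · exact List.nil_prefix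

lemma cs_max : ∀ (p a b : List Char), p <+: a → p <+: b → p <+: commonStartA a b
  | [], _, _, _, _ => List.nil_prefix
  | q :: ps, a, b, ha, hb => by
      obtain ⟨ta, rfl⟩ := ha
      obtain ⟨tb, hb'⟩ := hb
      cases b with
      | nil => simp at hb'
      | cons y bs =>
        obtain ⟨rfl, hb2⟩ : q = y ∧ ps ++ tb = bs := ⟨by injection hb', by injection hb'⟩
        rw [List.cons_append]
        simp only [cs_cons, beq_self_eq_true, if_true]
        exact List.cons_prefix_cons.mpr ⟨rfl, cs_max ps _ bs (List.prefix_append ps ta) ⟨tb, hb2⟩⟩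

lemma foldl_cs_prefix : ∀ (xs : List (List Char)) (a : List Char),
    (xs.foldl commonStartA a) <+: a ∧ ∀ l ∈ xs, (xs.foldl commonStartA a) <+: l
  | [], a => ⟨List.prefix_refl a, by simp⟩
  | x :: xs, a => by
      obtain ⟨h1, h2⟩ := foldl_cs_prefix xs (commonStartA a x)
      refine ⟨h1.trans (cs_prefix_left a x), ?_⟩
      intro l hl
      rcases List.mem_cons.mp hl with rfl | hl
      · exact h1.trans (cs_prefix_right a l)
      · exact h2 l hl

lemma foldl_cs_max : ∀ (xs : List (List Char)) (a p : List Char),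
    p <+: a → (∀ l ∈ xs, p <+: l) → p <+: xs.foldl commonStartA a
  | [], a, p, ha, _ => ha
  | x :: xs, a, p, ha, hxs => by
      exact foldl_cs_max xs _ p (cs_max p a x ha (hxs x List.mem_cons_self))
        (fun l hl => hxs l (List.mem_cons_of_mem _ hl))

lemma len_sub_dropWhile (p : Char → Bool) (l : List Char) :
    l.length - (l.dropWhile p).length = (l.takeWhile p).length := by
  have h := congrArg List.length (List.takeWhile_append_dropWhile (p := p) (l := l))
  simp only [List.length_append] at h
  omega

lemma takeWhile_getElem (p : Char → Bool) (l : List Char) (k : Nat) (hk : k < l.length)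
    (hW : k < (l.takeWhile p).length) : p l[k] = true := by
  have hpre := List.takeWhile_prefix (l := l) (p := p)
  have heq := hpre.getElem (i := k) hW
  have hp := List.mem_takeWhile_imp (List.getElem_mem hW)
  rwa [heq] at hp

lemma lt_length_takeWhile (p : Char → Bool) : ∀ (l : List Char) (j : Nat), j < l.length →
    (∀ k (hk : k < l.length), k ≤ j → p l[k] = true) → j < (l.takeWhile p).length
  | [], j, hj, _ => by simp at hj
  | x :: xs, j, hj, hall => by
      have hx : p x = true := hall 0 (by simp) (Nat.zero_le _)
      rw [List.takeWhile_cons_of_pos hx]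
      cases j with
      | zero => simp
      | succ j =>
        have := lt_length_takeWhile p xs j (by simpa using hj)
          (fun k hk hkj => hall (k+1) (by simpa using hk) (by omega))
        simpa using Nat.succ_lt_succ this

lemma scanStartB_eq (f : List Char) (r : List (List Char)) (s : Nat) :
    scanStartB f r s =
      if h : s < f.length then
        if PySem.Chars.isspace f[s] = true ∧ ∀ l ∈ r, s < l.length ∧ l[s]? = some f[s] then
          scanStartB f r (s + 1)
        else s
      else s := by
  rw [scanStartB]

lemma take_eq_of_prefix {c l : List Char} (h : c <+: l) {j : Nat} (hj : j ≤ c.length) :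
    l.take j = c.take j := by
  obtain ⟨t, rfl⟩ := h
  rw [List.take_append_of_le_length hj]

lemma scan_eq (l0 : List Char) (NB : List (List Char)) (c : List Char)
    (hc0 : c <+: l0) (hcNB : ∀ l ∈ NB, c <+: l)
    (hmax : ∀ p, p <+: l0 → (∀ l ∈ NB, p <+: l) → p <+: c) :
    ∀ j, j ≤ (c.takeWhile PySem.Chars.isspace).length →
      scanStartB l0 NB j = (c.takeWhile PySem.Chars.isspace).length := by
  set W := (c.takeWhile PySem.Chars.isspace).length with hW
  have hWc : W ≤ c.length := (List.takeWhile_prefix (p := PySem.Chars.isspace)).length_le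
  have hcl0 : c.length ≤ l0.length := hc0.length_le
  -- the guard holds exactly below W (given everything below j already agreed)
  have guard_true : ∀ j (hjW : j < W),
      ∃ (h : j < l0.length), PySem.Chars.isspace l0[j] = true ∧
        ∀ l ∈ NB, j < l.length ∧ l[j]? = some l0[j] := by
    intro j hjW
    have hjc : j < c.length := lt_of_lt_of_le hjW hWc
    have hjl : j < l0.length := lt_of_lt_of_le hjc hcl0
    have hce := hc0.getElem (i := j) hjc
    refine ⟨hjl, ?_, ?_⟩
    · have hwsc := takeWhile_getElem _ c j hjc hjW
      rwa [hce] at hwsc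
    · intro l hl
      have hcl := hcNB l hl
      have hjl' : j < l.length := lt_of_lt_of_le hjc hcl.length_le
      refine ⟨hjl', ?_⟩
      rw [List.getElem?_eq_getElem hjl']
      exact congrArg some (((hcl.getElem (i := j) hjc).symm).trans hce)
  have guard_false : ∀ (h : W < l0.length),
      ¬ (PySem.Chars.isspace l0[W] = true ∧ ∀ l ∈ NB, W < l.length ∧ l[W]? = some l0[W]) := by
    intro hWl ⟨hsp, hall⟩
    -- the common whitespace prefix would extend one more column
    have hp : l0.take (W + 1) <+: c := by
      refine hmax _ (List.take_prefix _ _) ?_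
      intro l hl
      obtain ⟨hlen, hget⟩ := hall l hl
      have hcl := hcNB l hl
      have h1 : l.take W = c.take W := take_eq_of_prefix hcl hWc
      have h2 : l0.take W = c.take W := take_eq_of_prefix hc0 hWc
      have : l.take (W + 1) = l0.take (W + 1) := by
        rw [List.take_add_one, List.take_add_one, hget, List.getElem?_eq_getElem hWl, h1, h2]
      rw [← this]
      exact List.take_prefix _ _
    have hlen : W + 1 ≤ c.length := by
      have := hp.length_le
      rwa [List.length_take, Nat.min_eq_left (by omega)] at this
    have : W < W := by
      rw [hW]
      refine lt_length_takeWhile _ c W (by omega) ?_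
      intro k hk hkW
      rcases Nat.lt_or_ge k W with hlt | hge
      · exact takeWhile_getElem _ c k hk hlt
      · have hkW' : k = W := by omega
        subst hkW'
        rw [hc0.getElem hk]
        exact hsp
    omega
  suffices H : ∀ n j, j ≤ W → W - j = n → scanStartB l0 NB j = W from
    fun j hj => H (W - j) j hj rfl
  intro n
  induction n with
  | zero =>
    intro j hj h0
    have hjW : j = W := by omega
    subst hjW
    rw [scanStartB_eq]
    split
    · rename_i hlt
      rw [if_neg (guard_false hlt)]
    · rfl
  | succ n ih =>
    intro j hj hn
    have hjW : j < W := by omega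
    obtain ⟨hlt, hg1, hg2⟩ := guard_true j hjW
    rw [scanStartB_eq, dif_pos hlt, if_pos ⟨hg1, hg2⟩]
    exact ih (j + 1) (by omega) (by omega)

lemma blank_isEmpty (l : List Char) : ((l.length == 0) : Bool) = l.isEmpty := by cases l <;> rfl

lemma nb_eq_not_blank (l : List Char) :
    (!(PySem.Chars.strip l).isEmpty) = !((PySem.Chars.strip l).length == 0) := by
  rw [blank_isEmpty]

lemma foldA_fst (xs : List (List Char)) : ∀ (acc : List (List Char)) (c : List Char),
    (xs.foldl
      (fun (st : List (List Char) × List Char) line =>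
        if (PySem.Chars.strip line).length == 0 then (([] : List Char) :: st.1, st.2)
        else (line :: st.1, commonStartA st.2 line))
      (acc, c)).1
    = (xs.map (fun l => if (PySem.Chars.strip l).length == 0 then ([] : List Char) else l)).reverse ++ acc := by
  induction xs with
  | nil => intro acc c; simp
  | cons x xs ih =>
    intro acc c
    simp only [List.foldl_cons, List.map_cons, List.reverse_cons]
    by_cases h : ((PySem.Chars.strip x).length == 0) = true
    · rw [if_pos h, if_pos h, ih]; simp
    · rw [if_neg h, if_neg h, ih]; simp

lemma foldA_snd (xs : List (List Char)) : ∀ (acc : List (List Char)) (c : List Char),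
    (xs.foldl
      (fun (st : List (List Char) × List Char) line =>
        if (PySem.Chars.strip line).length == 0 then (([] : List Char) :: st.1, st.2)
        else (line :: st.1, commonStartA st.2 line))
      (acc, c)).2
    = (xs.filter (fun l => !((PySem.Chars.strip l).length == 0))).foldl commonStartA c := by
  induction xs with
  | nil => intro acc c; simp
  | cons x xs ih =>
    intro acc c
    simp only [List.foldl_cons, List.filter_cons]
    by_cases h : ((PySem.Chars.strip x).length == 0) = true
    · rw [if_pos h, ih]; simp [h]
    · rw [if_neg h, ih]; simp [h]

lemma filter_enum_blank (xs : List (List Char)) (s : Int)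
    (h : ∀ l ∈ xs, ((PySem.Chars.strip l).length == 0) = true) :
    (PySem.List.enumerate xs s).filter (fun p => !(PySem.Chars.strip p.2).isEmpty) = [] := by
  rw [List.filter_eq_nil_iff]
  intro p hp
  rw [PySem.List.mem_enumerate_iff] at hp
  obtain ⟨k, hk, rfl⟩ := hp
  have := h _ (List.getElem_mem hk)
  simp [nb_eq_not_blank, this]

lemma final_branch (m0 m1 : List Char) (M'' : List (List Char))
    (hm0 : ((PySem.Chars.strip m0).length == 0) = false) (hm0ne : m0 ≠ []) :
    String.ofList
      (PySem.Chars.join ['\n']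
        (List.map
          (fun line =>
            if line.isEmpty = true then []
            else
              PySem.Chars.rstrip
                (List.drop
                  ((List.foldl
                        (fun st line =>
                          if ((PySem.Chars.strip line).length == 0) = true then ([] :: st.1, st.2)
                          else (line :: st.1, commonStartA st.2 line))
                        ([m0], m0) (m1 :: M'')).2.length -
                    (PySem.Chars.lstrip
                        (List.foldl
                            (fun st line =>
                              if ((PySem.Chars.strip line).length == 0) = true then ([] :: st.1, st.2)
                              else (line :: st.1, commonStartA st.2 line))
                            ([m0], m0) (m1 :: M'')).2).length)
                  line))
          (List.foldl
              (fun st line =>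
                if ((PySem.Chars.strip line).length == 0) = true then ([] :: st.1, st.2)
                else (line :: st.1, commonStartA st.2 line))
              ([m0], m0) (m1 :: M'')).1.reverse)) =
    String.ofList
      (PySem.Chars.join ['\n']
        (List.map
          (fun l =>
            if (!(PySem.Chars.strip l).isEmpty) = true then
              PySem.Chars.rstrip
                (List.drop
                  (scanStartB
                    ((List.filter (fun l => !(PySem.Chars.strip l).isEmpty) (m0 :: m1 :: M'')).headD [])
                    (List.drop 1 (List.filter (fun l => !(PySem.Chars.strip l).isEmpty) (m0 :: m1 :: M''))) 0)
                  l)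
            else [])
          (m0 :: m1 :: M''))) := by
  have h1 := foldA_fst (m1 :: M'') [m0] m0
  have h2 := foldA_snd (m1 :: M'') [m0] m0
  set NB := (m1 :: M'').filter (fun l => !((PySem.Chars.strip l).length == 0)) with hNB
  set c := NB.foldl commonStartA m0 with hc
  have hfilter2 : (m1 :: M'').filter (fun l => !(PySem.Chars.strip l).isEmpty) = NB := by
    rw [hNB]
    exact List.filter_congr (fun l _ => nb_eq_not_blank l)
  have hfilter : (m0 :: m1 :: M'').filter (fun l => !(PySem.Chars.strip l).isEmpty)
      = m0 :: NB := by
    rw [List.filter_cons, if_pos (by simp [nb_eq_not_blank, hm0]), hfilter2]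
  have pf := foldl_cs_prefix NB m0
  have hscan : scanStartB m0 NB 0 = (c.takeWhile PySem.Chars.isspace).length :=
    scan_eq m0 NB c pf.1 pf.2 (fun p hp hall => foldl_cs_max NB m0 p hp hall) 0 (Nat.zero_le _)
  have hstart : c.length - (PySem.Chars.lstrip c).length = (c.takeWhile PySem.Chars.isspace).length := by
    rw [show PySem.Chars.lstrip c = c.dropWhile PySem.Chars.isspace from rfl]
    exact len_sub_dropWhile _ c
  rw [h1, h2, hfilter, hstart]
  simp only [List.headD_cons, List.drop_succ_cons, List.drop_zero, hscan]
  have hrev : ((List.map (fun l => if ((PySem.Chars.strip l).length == 0) = true then [] else l)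
        (m1 :: M'')).reverse ++ [m0]).reverse
      = m0 :: List.map (fun l => if ((PySem.Chars.strip l).length == 0) = true then [] else l) (m1 :: M'') := by
    rw [List.reverse_append, List.reverse_reverse]; rfl
  have tailmap : ∀ (X : List (List Char)),
      List.map
        (fun line => if line.isEmpty = true then []
          else PySem.Chars.rstrip (List.drop (List.takeWhile PySem.Chars.isspace c).length line))
        (List.map (fun l => if ((PySem.Chars.strip l).length == 0) = true then [] else l) X)
      = List.map
        (fun l => if (!(PySem.Chars.strip l).isEmpty) = true then
            PySem.Chars.rstrip (List.drop (List.takeWhile PySem.Chars.isspace c).length l)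
          else []) X := by
    intro X
    induction X with
    | nil => rfl
    | cons x xs ih =>
      simp only [List.map_cons, ih]
      congr 1
      by_cases hbl : ((PySem.Chars.strip x).length == 0) = true
      · rw [if_pos hbl]; simp [nb_eq_not_blank, hbl]
      · have hlne : x ≠ [] := by intro h; subst h; exact hbl (by decide)
        rw [if_neg hbl]
        simp [nb_eq_not_blank, hbl, hlne]
  rw [hrev, List.map_cons, tailmap, List.map_cons]
  congr 3
  · simp [hm0ne]
    intro h
    rw [h] at hm0
    simp at hm0

theorem ports_agree (what : String) : strip_unneeded_whitespace what = strip_unneeded_whitespace_alt what := by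
  unfold strip_unneeded_whitespace strip_unneeded_whitespace_alt
  generalize PySem.Chars.splitlines what.toList = L
  cases hR1 : L.dropWhile (fun l => (PySem.Chars.strip l).length == 0) with
  | nil =>
    have hall : ∀ l ∈ L, ((PySem.Chars.strip l).length == 0) = true :=
      List.dropWhile_eq_nil_iff.mp hR1
    simp only [hR1, filter_enum_blank L 0 hall]
    simp
  | cons m0 R1' =>
    -- notation
    set B : List Char → Bool := fun l => (PySem.Chars.strip l).length == 0 with hB
    have hhead : B m0 = false := by
      have h1 : L.dropWhile B ≠ [] := by rw [hR1]; simp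
      have h2 := List.head_dropWhile_not B h1
      rwa [show (L.dropWhile B).head h1 = m0 from by simp [hR1]] at h2
    -- decompose the trimmed tail
    set R1 : List (List Char) := m0 :: R1' with hR1def
    set s : List (List Char) := R1.reverse.dropWhile B with hs
    set M : List (List Char) := s.reverse with hM
    set post : List (List Char) := (R1.reverse.takeWhile B).reverse with hpost
    set pre : List (List Char) := L.takeWhile B with hpre
    have hs_ne : s ≠ [] := by
      intro h
      have hall := List.dropWhile_eq_nil_iff.mp (hs ▸ h)
      have : B m0 = true := hall m0 (by simp [hR1def])
      rw [hhead] at this; exact absurd this (by simp)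
    have hM_ne : M ≠ [] := by simpa [hM] using hs_ne
    have hsplit : R1 = M ++ post := by
      have := List.takeWhile_append_dropWhile (p := B) (l := R1.reverse)
      calc R1 = R1.reverse.reverse := by rw [List.reverse_reverse]
        _ = (R1.reverse.takeWhile B ++ R1.reverse.dropWhile B).reverse := by rw [this]
        _ = M ++ post := by rw [List.reverse_append, hM, hpost]
    have hR1' : List.dropWhile B L = m0 :: R1' := hR1.trans hR1def
    have hLsplit : L = pre ++ R1 := by
      rw [hpre, hR1def, ← hR1', List.takeWhile_append_dropWhile]
    have hpre_blank : ∀ l ∈ pre, B l = true := fun l hl => List.mem_takeWhile_imp hl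
    have hpost_blank : ∀ l ∈ post, B l = true := by
      intro l hl
      exact List.mem_takeWhile_imp (List.mem_reverse.mp (hpost ▸ hl))
    -- M starts with m0
    obtain ⟨M', hMcons⟩ : ∃ M', M = m0 :: M' := by
      cases hMc : M with
      | nil => exact absurd hMc hM_ne
      | cons a M' =>
        have : m0 :: R1' = a :: (M' ++ post) := by
          rw [← hR1def, hsplit, hMc]; simp
        exact ⟨M', by rw [← (List.cons_eq_cons.mp this).1]⟩
    -- M ends with a non-blank line
    obtain ⟨sh, st', hscons⟩ : ∃ sh st', s = sh :: st' := by
      cases hsc : s with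
      | nil => exact absurd hsc hs_ne
      | cons a b => exact ⟨a, b, rfl⟩
    have hlast_nb : B sh = false := by
      have h1 : R1.reverse.dropWhile B ≠ [] := by rw [← hs]; exact hs_ne
      have h2 := List.head_dropWhile_not B h1
      rwa [show (R1.reverse.dropWhile B).head h1 = sh from by simp [← hs, hscons]] at h2
    have hMconcat : M = st'.reverse ++ [sh] := by rw [hM, hscons]; simp
    -- ===== B's index list =====
    have hfilterL : (PySem.List.enumerate L 0).filter (fun p => !(PySem.Chars.strip p.2).isEmpty)
        = (PySem.List.enumerate M (0 + (pre.length : Int))).filter (fun p => !(PySem.Chars.strip p.2).isEmpty) := by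
      rw [hLsplit, hsplit, ← List.append_assoc]
      rw [PySem.List.enumerate_append, PySem.List.enumerate_append, List.filter_append, List.filter_append]
      rw [filter_enum_blank pre 0 hpre_blank, filter_enum_blank post _ hpost_blank]
      simp
    have hnbm0 : (fun p : Int × List Char => !(PySem.Chars.strip p.2).isEmpty) (0 + (pre.length : Int), m0) = true := by
      simp only [nb_eq_not_blank]
      show (!B m0) = true
      rw [hhead]; rfl
    have hform1 : (PySem.List.enumerate M (0 + (pre.length : Int))).filter (fun p => !(PySem.Chars.strip p.2).isEmpty)
        = (0 + (pre.length : Int), m0) ::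
            (PySem.List.enumerate M' (0 + (pre.length : Int) + 1)).filter (fun p => !(PySem.Chars.strip p.2).isEmpty) := by
      rw [hMcons, PySem.List.enumerate_cons, List.filter_cons, if_pos hnbm0]
    have hnbsh : (fun p : Int × List Char => !(PySem.Chars.strip p.2).isEmpty) (0 + (pre.length : Int) + (st'.reverse.length : Int), sh) = true := by
      simp only [nb_eq_not_blank]
      show (!B sh) = true
      rw [hlast_nb]; rfl
    have hform2 : (PySem.List.enumerate M (0 + (pre.length : Int))).filter (fun p => !(PySem.Chars.strip p.2).isEmpty)
        = (PySem.List.enumerate st'.reverse (0 + (pre.length : Int))).filter (fun p => !(PySem.Chars.strip p.2).isEmpty)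
          ++ [(0 + (pre.length : Int) + (st'.reverse.length : Int), sh)] := by
      rw [hMconcat, PySem.List.enumerate_append, List.filter_append]
      congr 1
      rw [PySem.List.enumerate_cons, List.filter_cons, if_pos hnbsh]
      simp
    -- assemble the index list
    have hidxs1 : ((PySem.List.enumerate L).filter (fun p => !(PySem.Chars.strip p.2).isEmpty)).map (fun x => x.1)
        = (0 + (pre.length : Int)) ::
            ((PySem.List.enumerate M' (0 + (pre.length : Int) + 1)).filter (fun p => !(PySem.Chars.strip p.2).isEmpty)).map (fun x => x.1) := by
      rw [hfilterL, hform1, List.map_cons]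
    have hidxs2 : ((PySem.List.enumerate L).filter (fun p => !(PySem.Chars.strip p.2).isEmpty)).map (fun x => x.1)
        = ((PySem.List.enumerate st'.reverse (0 + (pre.length : Int))).filter (fun p => !(PySem.Chars.strip p.2).isEmpty)).map (fun x => x.1)
          ++ [0 + (pre.length : Int) + (st'.reverse.length : Int)] := by
      rw [hfilterL, hform2, List.map_append, List.map_cons]; rfl
    have hslice : PySem.List.slice L (some (0 + (pre.length : Int)))
        (some (0 + (pre.length : Int) + (st'.reverse.length : Int) + 1)) = M := by
      have h1 : (0 + (pre.length : Int)) = ((pre.length : Nat) : Int) := by omega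
      have h2 : ((pre.length : Int) + (st'.reverse.length : Int) + 1)
          = (((pre.length + st'.reverse.length + 1 : Nat)) : Int) := by omega
      rw [h1, h2, PySem.List.slice_natCast]
      have hd : L.drop pre.length = M ++ post := by rw [hLsplit, List.drop_left, hsplit]
      have hlen : pre.length + st'.reverse.length + 1 - pre.length = M.length := by
        rw [hMconcat]; simp; omega
      rw [hd, hlen, List.take_left]
    -- an A-side trim identity
    have hAtrim : (List.dropWhile B (List.dropWhile B L).reverse).reverse = M := by
      rw [hR1, ← hs, ← hM]
    have h12 := hidxs1.symm.trans hidxs2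
    have hgl2 : ((0 + (pre.length : Int)) ::
            ((PySem.List.enumerate M' (0 + (pre.length : Int) + 1)).filter
              (fun p => !(PySem.Chars.strip p.2).isEmpty)).map (fun x => x.1)).getLastD 0
          = 0 + (pre.length : Int) + (st'.reverse.length : Int) := by
      rw [h12]
      exact List.getLastD_concat
    simp only [hAtrim, hidxs1, List.isEmpty_cons, List.headD_cons, hgl2, hslice, hMcons,
      Bool.false_eq_true, if_false]
    cases M' with
    | nil => simp
    | cons m1 M'' =>
      rw [if_neg (by simp)]
      -- general branch on both sides
      have hm0ne : m0 ≠ [] := by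
        intro h
        have hb : B ([] : List Char) = true := by rw [hB]; decide
        rw [h, hb] at hhead
        exact absurd hhead (by simp)
      have hm0 : ((PySem.Chars.strip m0).length == 0) = false := by
        have := hhead; rw [hB] at this; exact this
      exact final_branch m0 m1 M'' hm0 hm0ne

-- ===== VERDICT (by name: the statement is the Claim_ definition above) =====
theorem strip_unneeded_whitespace_spec : Claim_equal_strip_unneeded_whitespace := by
  intro what _
  unfold Spec_strip_unneeded_whitespace
  exact ports_agree what
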